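-- pv_equiv track=rewrite | github.com/yonggyunbaek/python-gosu | 2024-09-Week1/2024-09-02_ hopscotch.py | solution
-- ===== SOURCE A (Python) =====
-- def solution(land):
--     #dynamic programming
--     dp = [[0]*4 for _ in range(len(land))]
--     # test = [except_i for except_i in range(4) if except_i != 1]
--     for i in range(len(land)):# row
--         for j in range(len(land[0])): # space
--             if i == 0:
--                 dp[i][j] = land[i][j]
--             else:
--                 dp[i][j] = land[i][j] + max(dp[i-1][except_i] for except_i in range(4) if except_i != j)
--     """
-- dp[i][0] = land[i][0] + max(dp[i-1][1], dp[i-1][2], dp[i-1][3])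
-- dp[i][1] = land[i][1] + max(dp[i-1][0], dp[i-1][2], dp[i-1][3])
--     """
--     return max(dp[-1])
-- ===== SOURCE B (Python) =====
-- def solution(land):
--     # Rolling dp over the 4-column board, one uniform pass over the rows.
--     # Each round only the first len(land[0]) columns are playable (the board
--     # supplies no scores elsewhere); the best and second-best of the previous
--     # row replace the per-cell scan over the other columns.
--     width = len(land[0])
--     prev = [0, 0, 0, 0]
--     for row in land:
--         best = max(prev)
--         k = prev.index(best)
--         second = max(v for j, v in enumerate(prev) if j != k)
--         prev[:width] = [row[j] + (second if j == k else best) for j in range(width)]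
--     return max(prev)
-- ===== Notes on version B (the rewrite author's own statement) =====
-- stated objective: alternative
-- what changed: Replaces the full dp matrix and the per-cell scan of the other three columns by one uniform rolling pass whose best/argbest/second-best of the previous row are computed once per row; Pre_ excludes exactly the inputs on which A raises IndexError (empty land, first row wider than the 4 dp columns, a later row shorter than the first).
import Mathlib
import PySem

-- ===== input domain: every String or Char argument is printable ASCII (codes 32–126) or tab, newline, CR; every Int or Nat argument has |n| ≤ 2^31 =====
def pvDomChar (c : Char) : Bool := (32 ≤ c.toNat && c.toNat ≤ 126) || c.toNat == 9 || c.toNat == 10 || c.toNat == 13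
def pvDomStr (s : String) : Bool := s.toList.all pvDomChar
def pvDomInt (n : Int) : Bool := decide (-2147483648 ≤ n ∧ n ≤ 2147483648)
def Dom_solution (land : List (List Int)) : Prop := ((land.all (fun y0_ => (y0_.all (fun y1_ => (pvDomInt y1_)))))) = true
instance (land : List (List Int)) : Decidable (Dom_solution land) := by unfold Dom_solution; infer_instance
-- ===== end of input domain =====

set_option maxHeartbeats 1000000
set_option maxRecDepth 8000

-- B replaces A's full dp matrix (with a scan of the other three columns per cell) by one uniform
-- rolling pass keeping only the previous row and its best / argbest / second-best.

-- A's 'max(dp[i-1][except_i] for except_i in range(4) if except_i != j)'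
def pvMaxExcept (prev : List Int) (j : Nat) : Int :=
  (PySem.List.max? (((List.range 4).filter (fun e => e ≠ j)).map (fun e => prev.getD e 0)) id).getD 0

-- ===== PORT A =====
def solution (land : List (List Int)) : Int :=
  let n := land.length
  let dp0 : List (List Int) := List.replicate n [0,0,0,0]
  let dp := (List.range n).foldl (fun dp i =>
    (List.range (land.headD []).length).foldl (fun dp j =>
      dp.set i ((dp.getD i []).set j
        (if i = 0 then (land.getD i []).getD j 0
         else (land.getD i []).getD j 0 + pvMaxExcept (dp.getD (i-1) []) j))) dp) dp0
  (PySem.List.max? (dp.getD (n-1) []) id).getD 0   -- max(dp[-1])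

-- ===== PORT B =====
-- B's loop body: best/argbest/second-best of prev, then 'prev[:width] = [...]' (= new prefix ++ old tail)
def pvStepB (width : Nat) (prev row : List Int) : List Int :=
  let best := (PySem.List.max? prev id).getD 0
  let k := (PySem.List.index? prev best).getD 0
  let second := (PySem.List.max? (((PySem.List.enumerate prev 0).filter (fun p => p.1 ≠ (k : Int))).map Prod.snd) id).getD 0
  ((List.range width).map (fun j => row.getD j 0 + (if j = k then second else best))) ++ prev.drop width

def solution_alt (land : List (List Int)) : Int :=
  let width := (land.headD []).length
  let last := land.foldl (fun prev row => pvStepB width prev row) [0,0,0,0]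
  (PySem.List.max? last id).getD 0

-- ===== PRECONDITION & SPEC =====
-- Pre_ excludes exactly the inputs on which the Python A raises IndexError: empty land (dp[-1]),
-- first row wider than the 4 dp columns (dp[0][j]), or a later row shorter than the first (land[i][j]).
def Pre_solution (land : List (List Int)) : Prop :=
  land ≠ [] ∧ (land.headD []).length ≤ 4 ∧ ∀ r ∈ land, (land.headD []).length ≤ r.length
instance (land : List (List Int)) : Decidable (Pre_solution land) := by unfold Pre_solution; infer_instance
def pvWitness_solution : List (List Int) := [[1,2,3,4],[4,3,2,1],[0,-1,5,2]]

def Spec_solution (land : List (List Int)) (out : Int) : Prop := out = solution_alt land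
instance (land : List (List Int)) (out : Int) : Decidable (Spec_solution land out) := by unfold Spec_solution; infer_instance

-- ===== CLAIM (what is proved, stated in full; the proofs are below) =====
def Claim_equal_solution : Prop := ∀ (land : List (List Int)), Dom_solution land → Pre_solution land → Spec_solution land (solution land)

-- ===== LEMMAS AND PROOFS =====

-- the dp rows of the recurrence, as a left fold over the row index
def pvFirstRow (w : Nat) (r : List Int) : List Int :=
  (List.range 4).map (fun j => if j < w then r.getD j 0 else 0)
def pvStep (w : Nat) (prev r : List Int) : List Int :=
  (List.range 4).map (fun j => if j < w then r.getD j 0 + pvMaxExcept prev j else 0)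
def pvRows (land : List (List Int)) (k : Nat) : List Int :=
  (List.range k).foldl (fun prev t => pvStep (land.headD []).length prev (land.getD (t+1) []))
    (pvFirstRow (land.headD []).length (land.getD 0 []))

lemma pvRows_zero (land : List (List Int)) :
    pvRows land 0 = pvFirstRow (land.headD []).length (land.getD 0 []) := rfl

lemma pvRows_succ (land : List (List Int)) (k : Nat) :
    pvRows land (k+1) = pvStep (land.headD []).length (pvRows land k) (land.getD (k+1) []) := by
  simp [pvRows, List.range_succ]

lemma pvStep_length (w : Nat) (p r : List Int) : (pvStep w p r).length = 4 := by
  simp [pvStep]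

-- the best / argbest / second-best trick computes the same per-column max-excluding-j
lemma pvKey (p : List Int) (h4 : p.length = 4) (j : Nat) (_hj : j < 4) :
    (if j = (PySem.List.index? p ((PySem.List.max? p id).getD 0)).getD 0
       then pvMaxExcept p ((PySem.List.index? p ((PySem.List.max? p id).getD 0)).getD 0)
       else (PySem.List.max? p id).getD 0)
    = pvMaxExcept p j := by
  obtain ⟨M, hM⟩ : ∃ M, PySem.List.max? p id = some M := by
    rcases h : PySem.List.max? p id with _ | M
    · rw [PySem.List.max?_eq_none_iff] at h
      subst h; simp at h4
    · exact ⟨M, rfl⟩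
  have hMgd : (PySem.List.max? p id).getD 0 = M := by rw [hM]; rfl
  have hub : ∀ y ∈ p, y ≤ M := by
    intro y hy
    simpa using PySem.List.max?_isMax hM y hy
  have hMp : M ∈ p := PySem.List.max?_mem hM
  obtain ⟨k, hk⟩ : ∃ k, PySem.List.index? p M = some k := by
    rcases h : PySem.List.index? p M with _ | k
    · rw [PySem.List.index?_eq_none_iff] at h
      exact absurd hMp h
    · exact ⟨k, rfl⟩
  obtain ⟨hklen, hkM, -⟩ := PySem.List.getElem_of_index?_eq_some hk
  rw [hMgd, hk]
  by_cases hjk : j = (some k).getD 0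
  · rw [if_pos hjk, hjk]
  · rw [if_neg hjk]
    have hkj : k ≠ j := by
      intro h; exact hjk (by simp [h])
    obtain ⟨m, hm⟩ : ∃ m, PySem.List.max?
        (((List.range 4).filter (fun e => e ≠ j)).map (fun e => p.getD e 0)) id = some m := by
      rcases h : PySem.List.max? (((List.range 4).filter (fun e => e ≠ j)).map (fun e => p.getD e 0)) id with _ | m
      · rw [PySem.List.max?_eq_none_iff] at h
        have : M ∈ (((List.range 4).filter (fun e => e ≠ j)).map (fun e => p.getD e 0)) := by
          refine List.mem_map.mpr ⟨k, List.mem_filter.mpr ⟨List.mem_range.mpr (by omega), by simpa using hkj⟩, ?_⟩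
          rw [List.getD_eq_getElem p 0 hklen, hkM]
        rw [h] at this
        simp at this
      · exact ⟨m, rfl⟩
    have hMmem : M ∈ (((List.range 4).filter (fun e => e ≠ j)).map (fun e => p.getD e 0)) := by
      refine List.mem_map.mpr ⟨k, List.mem_filter.mpr ⟨List.mem_range.mpr (by omega), by simpa using hkj⟩, ?_⟩
      rw [List.getD_eq_getElem p 0 hklen, hkM]
    have h1 : M ≤ m := by simpa using PySem.List.max?_isMax hm M hMmem
    have h2 : m ≤ M := by
      have hmmem := PySem.List.max?_mem hm
      obtain ⟨e, he, rfl⟩ := List.mem_map.mp hmmem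
      have he4 : e < 4 := List.mem_range.mp (List.mem_filter.mp he).1
      exact hub _ (by rw [List.getD_eq_getElem p 0 (by omega)]; exact List.getElem_mem _)
    unfold pvMaxExcept
    rw [hm]
    simp only [Option.getD_some]
    omega

-- a single inner-loop step dp[i][j] = v, folded over j, only rewrites row i
lemma pvInnerFold (dp : List (List Int)) (i m : Nat) (hi : i < dp.length)
    (v : List (List Int) → Nat → Int) (hv : ∀ r j, v (dp.set i r) j = v dp j) :
    (List.range m).foldl (fun d j => d.set i ((d.getD i []).set j (v d j))) dp
      = dp.set i ((List.range m).foldl (fun row j => row.set j (v dp j)) (dp.getD i [])) := by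
  induction m with
  | zero =>
    simp only [List.range_zero, List.foldl_nil]
    rw [List.getD_eq_getElem?_getD, List.getElem?_eq_getElem hi]
    exact (List.set_getElem_self hi).symm
  | succ m ih =>
    rw [List.range_succ, List.foldl_append, List.foldl_append, ih,
      List.foldl_cons, List.foldl_nil, List.foldl_cons, List.foldl_nil]
    have hgd : (dp.set i ((List.range m).foldl (fun row j => row.set j (v dp j)) (dp.getD i []))).getD i []
        = (List.range m).foldl (fun row j => row.set j (v dp j)) (dp.getD i []) := by
      rw [List.getD_eq_getElem?_getD, List.getElem?_set_self hi]; rfl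
    rw [hgd, hv, List.set_set]

lemma pvRowFold (m : Nat) (hm : m ≤ 4) (g : Nat → Int) :
    (List.range m).foldl (fun row j => row.set j (g j)) ([0,0,0,0] : List Int)
      = (List.range 4).map (fun j => if j < m then g j else 0) := by
  induction m with
  | zero => simp
  | succ m ih =>
    rw [List.range_succ, List.foldl_append, ih (by omega), List.foldl_cons, List.foldl_nil]
    apply List.ext_getElem
    · simp
    · intro k hk1 hk2
      simp only [List.length_set, List.length_map, List.length_range] at hk1
      rw [List.getElem_set]
      simp only [List.getElem_map, List.getElem_range]
      by_cases hkm : m = k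
      · subst hkm; simp
      · simp only [if_neg hkm]
        split_ifs <;> first | rfl | omega

-- invariant of A's outer loop
lemma pvOuter (land : List (List Int)) (hw : (land.headD []).length ≤ 4) :
    ∀ k, k ≤ land.length →
      (List.range k).foldl (fun dp i =>
        (List.range (land.headD []).length).foldl (fun dp j =>
          dp.set i ((dp.getD i []).set j
            (if i = 0 then (land.getD i []).getD j 0
             else (land.getD i []).getD j 0 + pvMaxExcept (dp.getD (i-1) []) j))) dp)
        (List.replicate land.length ([0,0,0,0] : List Int))
      = (List.range k).map (pvRows land) ++ List.replicate (land.length - k) [0,0,0,0] := by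
  intro k
  induction k with
  | zero => intro _; simp
  | succ k ih =>
    intro hk
    rw [List.range_succ, List.foldl_append, ih (by omega), List.foldl_cons, List.foldl_nil]
    have hsplit : List.replicate (land.length - k) ([0,0,0,0] : List Int)
        = [0,0,0,0] :: List.replicate (land.length - k - 1) [0,0,0,0] := by
      have h1 : land.length - k = (land.length - k - 1) + 1 := by omega
      conv_lhs => rw [h1]
      rw [List.replicate_succ]
    rw [hsplit]
    have hlenA : ((List.range k).map (pvRows land)).length = k := by simp
    have hdplen : k < ((List.range k).map (pvRows land) ++
        ([0,0,0,0] :: List.replicate (land.length - k - 1) [0,0,0,0])).length := by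
      simp
    have hgetk : (((List.range k).map (pvRows land)) ++
        ([0,0,0,0] :: List.replicate (land.length - k - 1) [0,0,0,0])).getD k [] = [0,0,0,0] := by
      rw [List.getD_eq_getElem?_getD, List.getElem?_append_right (by omega), hlenA]
      simp
    rw [pvInnerFold _ k _ hdplen
      (fun d j => if k = 0 then (land.getD k []).getD j 0
        else (land.getD k []).getD j 0 + pvMaxExcept (d.getD (k-1) []) j)
      (by
        intro r j
        by_cases hk0 : k = 0
        · simp [hk0]
        · simp only [if_neg hk0, List.getD_eq_getElem?_getD,
            List.getElem?_set_ne (show k ≠ k - 1 by omega)]), hgetk, pvRowFold _ hw]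
    have hrow : (List.range 4).map (fun j => if j < (land.headD []).length then
        (if k = 0 then (land.getD k []).getD j 0
         else (land.getD k []).getD j 0 + pvMaxExcept
           ((((List.range k).map (pvRows land)) ++
             ([0,0,0,0] :: List.replicate (land.length - k - 1) [0,0,0,0])).getD (k-1) []) j) else 0)
        = pvRows land k := by
      cases k with
      | zero => simp [pvRows_zero, pvFirstRow]
      | succ s =>
        have hget : ((((List.range (s+1)).map (pvRows land)) ++
            ([0,0,0,0] :: List.replicate (land.length - (s+1) - 1) [0,0,0,0])).getD (s+1-1) [])
            = pvRows land s := by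
          simp only [Nat.add_sub_cancel]
          rw [List.getD_eq_getElem?_getD, List.getElem?_append_left (by simp),
            List.getElem?_map, List.getElem?_range (by omega)]
          rfl
        simp only [Nat.succ_ne_zero, if_false, hget]
        rw [pvRows_succ]
        simp [pvStep]
    rw [hrow]
    have hset : ((((List.range k).map (pvRows land)) ++
        ([0,0,0,0] :: List.replicate (land.length - k - 1) [0,0,0,0])).set k (pvRows land k))
        = ((List.range k).map (pvRows land)) ++
          (pvRows land k :: List.replicate (land.length - k - 1) [0,0,0,0]) := by
      rw [show k = ((List.range k).map (pvRows land)).length from hlenA.symm]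
      simp
    rw [hset, show land.length - (k+1) = land.length - k - 1 from by omega]
    simp

lemma pvA_eq (land : List (List Int)) (hne : land ≠ []) (hw : (land.headD []).length ≤ 4) :
    solution land = (PySem.List.max? (pvRows land (land.length - 1)) id).getD 0 := by
  have hn : 1 ≤ land.length := List.length_pos_iff.mpr hne
  simp only [solution]
  rw [pvOuter land hw land.length (le_refl _)]
  rw [Nat.sub_self, List.replicate_zero, List.append_nil]
  rw [List.getD_eq_getElem?_getD, List.getElem?_map, List.getElem?_range (by omega)]
  rfl

-- fold over a list equals fold over indices
lemma pvFoldIdx {β : Type} (f : β → List Int → β) :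
    ∀ (xs : List (List Int)) (p : β),
      xs.foldl f p = (List.range xs.length).foldl (fun acc t => f acc (xs.getD t [])) p := by
  intro xs
  induction xs using List.reverseRecOn with
  | nil => intro p; simp
  | append_singleton ys y ih =>
    intro p
    rw [List.foldl_append, List.foldl_cons, List.foldl_nil, ih,
      List.length_append, List.length_singleton, List.range_succ, List.foldl_append,
      List.foldl_cons, List.foldl_nil]
    have h1 : (List.range ys.length).foldl (fun acc t => f acc ((ys ++ [y]).getD t [])) p
        = (List.range ys.length).foldl (fun acc t => f acc (ys.getD t [])) p := by
      apply PySem.List.foldl_congr_mem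
      intro acc t ht
      rw [List.getD_eq_getElem?_getD, List.getD_eq_getElem?_getD,
        List.getElem?_append_left (List.mem_range.mp ht)]
    have h2 : (ys ++ [y]).getD ys.length [] = y := by
      rw [List.getD_eq_getElem?_getD, List.getElem?_append_right (le_refl _), Nat.sub_self]
      rfl
    rw [h1, h2]

-- B's enumerate-based second-best list equals A's range-based one on a 4-row
lemma pvEnumFilter (a b c d : Int) (k : Nat) (hk : k < 4) :
    ((PySem.List.enumerate [a,b,c,d] 0).filter (fun p => p.1 ≠ (k : Int))).map Prod.snd
      = ((List.range 4).filter (fun e => e ≠ k)).map (fun e => ([a,b,c,d] : List Int).getD e 0) := by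
  interval_cases k <;>
    simp [PySem.List.enumerate_cons, PySem.List.enumerate_nil, List.filter, List.range_succ]

-- a w-prefix followed by zeros is the range-4 guarded row
lemma pvSplitRow (w : Nat) (hw : w ≤ 4) (g : Nat → Int) :
    (List.range w).map g ++ List.replicate (4 - w) 0
      = (List.range 4).map (fun j => if j < w then g j else 0) := by
  apply List.ext_getElem
  · simp; omega
  · intro k hk1 hk2
    simp only [List.length_map, List.length_range] at hk2
    by_cases hkw : k < w
    · rw [List.getElem_append_left (by simpa using hkw)]
      simp [hkw]
    · rw [List.getElem_append_right (by simpa using hkw)]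
      simp only [List.getElem_map, List.getElem_range, if_neg hkw]
      simp

-- a 4-row whose entries from w on are zero has an all-zero w-tail
lemma pvDropZero (w : Nat) (prev : List Int) (hp : prev.length = 4)
    (hz : ∀ j, w ≤ j → prev.getD j 0 = 0) :
    prev.drop w = List.replicate (4 - w) (0 : Int) := by
  apply List.ext_getElem
  · simp [hp]
  · intro k hk1 hk2
    rw [List.getElem_drop]
    have := hz (w + k) (by omega)
    rw [List.getD_eq_getElem prev 0 (by simp [hp]; simp [hp] at hk1; omega)] at this
    simpa using this

-- B's fold body equals pvStep w on tail-zero 4-rows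
lemma pvStepBA (w : Nat) (hw : w ≤ 4) (prev r : List Int) (hp : prev.length = 4)
    (hz : ∀ j, w ≤ j → prev.getD j 0 = 0) :
    pvStepB w prev r = pvStep w prev r := by
  obtain ⟨a, b, c, d, rfl⟩ : ∃ a b c d, prev = [a,b,c,d] := by
    match prev, hp with
    | [a,b,c,d], _ => exact ⟨a,b,c,d, rfl⟩
  obtain ⟨M, hM⟩ : ∃ M, PySem.List.max? ([a,b,c,d] : List Int) id = some M := by
    rcases h : PySem.List.max? ([a,b,c,d] : List Int) id with _ | M
    · rw [PySem.List.max?_eq_none_iff] at h; simp at h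
    · exact ⟨M, rfl⟩
  obtain ⟨k, hk⟩ : ∃ k, PySem.List.index? ([a,b,c,d] : List Int) M = some k := by
    rcases h : PySem.List.index? ([a,b,c,d] : List Int) M with _ | k
    · rw [PySem.List.index?_eq_none_iff] at h
      exact absurd (PySem.List.max?_mem hM) h
    · exact ⟨k, rfl⟩
  have hklt : k < 4 := by
    have := (PySem.List.getElem_of_index?_eq_some hk).1
    simpa using this
  unfold pvStepB
  simp only [hM, hk, Option.getD_some]
  rw [pvEnumFilter a b c d k hklt]
  have hdef : (PySem.List.max? (List.map (fun e => ([a,b,c,d] : List Int).getD e 0)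
      (List.filter (fun e => decide (e ≠ k)) (List.range 4))) id).getD 0
      = pvMaxExcept [a,b,c,d] k := rfl
  rw [hdef, pvDropZero w [a,b,c,d] (by simp) hz, pvSplitRow w hw, pvStep]
  apply List.map_congr_left
  intro j hj
  by_cases hjw : j < w
  · rw [if_pos hjw, if_pos hjw]
    have hkey := pvKey ([a,b,c,d] : List Int) (by simp) j (by have := List.mem_range.mp hj; omega)
    rw [hM] at hkey
    simp only [Option.getD_some] at hkey
    rw [hk] at hkey
    simp only [Option.getD_some] at hkey
    rw [hkey]
  · rw [if_neg hjw, if_neg hjw]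

-- pvStep w preserves the all-zero tail
lemma pvStep_tail (w : Nat) (p r : List Int) :
    ∀ j, w ≤ j → (pvStep w p r).getD j 0 = 0 := by
  intro j hj
  unfold pvStep
  rcases Nat.lt_or_ge j 4 with hj4 | hj4
  · rw [List.getD_eq_getElem _ 0 (by simpa using hj4)]
    simp only [List.getElem_map, List.getElem_range]
    rw [if_neg (by omega)]
  · rw [List.getD_eq_getElem?_getD, List.getElem?_eq_none (by simpa using hj4)]
    rfl

lemma pvFoldB (w : Nat) (hw : w ≤ 4) : ∀ (rs : List (List Int)) (prev : List Int),
    prev.length = 4 → (∀ j, w ≤ j → prev.getD j 0 = 0) →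
    rs.foldl (fun prev row => pvStepB w prev row) prev
    = rs.foldl (fun prev row => pvStep w prev row) prev := by
  intro rs
  induction rs with
  | nil => intro prev _ _; rfl
  | cons r rs ih =>
    intro prev h4 hz
    rw [List.foldl_cons, List.foldl_cons, pvStepBA w hw prev r h4 hz,
      ih _ (pvStep_length w prev r) (pvStep_tail w prev r)]

lemma pvMaxExceptZero (j : Nat) (hj : j < 4) : pvMaxExcept [0,0,0,0] j = 0 := by
  interval_cases j <;> rfl

-- B's first step from the all-zero row is exactly the dp's first row
lemma pvFirstStep (w : Nat) (hw : w ≤ 4) (r : List Int) :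
    pvStepB w [0,0,0,0] r = pvFirstRow w r := by
  rw [pvStepBA w hw [0,0,0,0] r (by simp) (by
    intro j _
    rcases Nat.lt_or_ge j 4 with h | h
    · interval_cases j <;> rfl
    · rw [List.getD_eq_getElem?_getD, List.getElem?_eq_none (by simpa using h)]; rfl)]
  unfold pvStep pvFirstRow
  apply List.map_congr_left
  intro j hj
  by_cases hjw : j < w
  · rw [if_pos hjw, if_pos hjw, pvMaxExceptZero j (by have := List.mem_range.mp hj; omega), add_zero]
  · rw [if_neg hjw, if_neg hjw]

lemma pvB_eq (land : List (List Int)) (hne : land ≠ [])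
    (hw : (land.headD []).length ≤ 4) :
    solution_alt land = (PySem.List.max? (pvRows land (land.length - 1)) id).getD 0 := by
  obtain ⟨l0, rest, rfl⟩ : ∃ l0 rest, land = l0 :: rest := by
    cases land with
    | nil => exact absurd rfl hne
    | cons a l => exact ⟨a, l, rfl⟩
  simp only [List.headD_cons] at hw
  simp only [solution_alt, List.headD_cons, List.foldl_cons]
  rw [pvFirstStep l0.length hw l0]
  rw [pvFoldB l0.length hw rest (pvFirstRow l0.length l0) (by simp [pvFirstRow])
    (by
      intro j hj
      unfold pvFirstRow
      rcases Nat.lt_or_ge j 4 with h | h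
      · rw [List.getD_eq_getElem _ 0 (by simpa using h)]
        simp only [List.getElem_map, List.getElem_range]
        rw [if_neg (by omega)]
      · rw [List.getD_eq_getElem?_getD, List.getElem?_eq_none (by simpa using h)]; rfl)]
  rw [pvFoldIdx]
  have : (List.range rest.length).foldl
      (fun acc t => pvStep l0.length acc (rest.getD t []))
      (pvFirstRow l0.length l0)
      = pvRows (l0 :: rest) rest.length := by
    unfold pvRows
    simp only [List.headD_cons, List.getD_cons_succ, List.getD_cons_zero]
  rw [this]
  simp

-- ===== VERDICT (by name: the statement is the Claim_ definition above) =====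
theorem solution_spec : Claim_equal_solution := by
  intro land _ hpre
  obtain ⟨hne, hw, -⟩ := hpre
  unfold Spec_solution
  rw [pvA_eq land hne hw, pvB_eq land hne hw]
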